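-- pv_equiv track=rewrite | github.com/M-dime/python_dsa | stacks.py | eqiheight
-- ===== SOURCE A (Python) =====
-- def eqiheight(h1,h2,h3):
--     while h1 and h2 and h3:
--         s1, s2, s3 =sum(h1), sum(h2), sum(h3)
--         ans = min(s1,s2,s3)
--         if s1 == s2 == s3:
--             return ans
--         if s1> ans:
--             h1.pop(0)
--         if s2>ans:
--             h2.pop(0)
--         if s3>ans:
--             h3.pop(0)
--     return -1
-- ===== SOURCE B (Python) =====
-- def eqiheight(h1, h2, h3):
--     s1, s2, s3 = sum(h1), sum(h2), sum(h3)
--     i1 = i2 = i3 = 0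
--     n1, n2, n3 = len(h1), len(h2), len(h3)
--     while i1 < n1 and i2 < n2 and i3 < n3:
--         m = min(s1, s2, s3)
--         if s1 == s2 == s3:
--             return m
--         if s1 > m:
--             s1 -= h1[i1]
--             i1 += 1
--         if s2 > m:
--             s2 -= h2[i2]
--             i2 += 1
--         if s3 > m:
--             s3 -= h3[i3]
--             i3 += 1
--     return -1
-- ===== Notes on version B (the rewrite author's own statement) =====
-- stated objective: faster
-- what changed: B keeps running suffix sums and index pointers and decrements a sum by one element per pop instead of re-summing all three (mutated) lists on every iteration; B does not mutate its arguments (return-value equivalence).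
import Mathlib
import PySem

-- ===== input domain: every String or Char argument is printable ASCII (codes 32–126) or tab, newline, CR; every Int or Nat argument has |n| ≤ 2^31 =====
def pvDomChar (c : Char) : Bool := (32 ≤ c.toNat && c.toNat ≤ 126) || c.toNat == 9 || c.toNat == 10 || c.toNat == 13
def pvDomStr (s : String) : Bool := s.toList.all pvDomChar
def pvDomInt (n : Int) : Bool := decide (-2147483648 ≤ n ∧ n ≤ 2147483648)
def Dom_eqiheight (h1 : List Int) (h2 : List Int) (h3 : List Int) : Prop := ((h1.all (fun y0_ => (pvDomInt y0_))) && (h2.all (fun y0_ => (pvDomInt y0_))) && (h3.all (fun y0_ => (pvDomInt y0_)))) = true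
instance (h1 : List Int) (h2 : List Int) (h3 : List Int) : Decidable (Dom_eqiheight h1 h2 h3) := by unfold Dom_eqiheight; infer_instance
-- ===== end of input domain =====

-- B replaces A's per-iteration re-summation of the three (front-popped) lists by running suffix
-- sums and index pointers, decrementing one sum per pop (objective: faster, asymptotic).
-- A mutates its arguments in place (pop(0)); B does not: the equivalence proved is about the return value only.

-- ===== PORT A =====
-- while h1 and h2 and h3: re-sum all three lists, return min if all equal, else pop(0) from each
-- list whose sum exceeds the min.  h.pop(0) on a nonempty list leaves h.tail.  The loop is made
-- structural with a fuel counter; fuel = total length + 1 is always enough (each non-returning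
-- iteration removes at least one element), so the fuel-exhausted branch is never reached.
def eqiheightGo (fuel : Nat) (h1 : List Int) (h2 : List Int) (h3 : List Int) : Int :=
  match fuel with
  | 0 => -1
  | fuel + 1 =>
    if h1 ≠ [] ∧ h2 ≠ [] ∧ h3 ≠ [] then
      let s1 := h1.sum
      let s2 := h2.sum
      let s3 := h3.sum
      let ans := min s1 (min s2 s3)
      if s1 = s2 ∧ s2 = s3 then ans
      else
        eqiheightGo fuel (if s1 > ans then h1.tail else h1)
                         (if s2 > ans then h2.tail else h2)
                         (if s3 > ans then h3.tail else h3)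
    else -1

def eqiheight (h1 : List Int) (h2 : List Int) (h3 : List Int) : Int :=
  eqiheightGo (h1.length + h2.length + h3.length + 1) h1 h2 h3

-- ===== PORT B =====
-- Source B's loop: index pointers i1 i2 i3 and running sums s1 s2 s3, one pop = one subtraction.
-- h1[i1] (guarded by i1 < len(h1)) is ported as h1.getD i1 0, exact since the guard keeps the
-- index in range.  Same fuel guard as above; never reached from eqiheight_alt's initial fuel.
def eqiheightAltGo (fuel : Nat) (h1 : List Int) (h2 : List Int) (h3 : List Int)
    (i1 i2 i3 : Nat) (s1 s2 s3 : Int) : Int :=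
  match fuel with
  | 0 => -1
  | fuel + 1 =>
    if i1 < h1.length ∧ i2 < h2.length ∧ i3 < h3.length then
      let m := min s1 (min s2 s3)
      if s1 = s2 ∧ s2 = s3 then m
      else
        eqiheightAltGo fuel h1 h2 h3
          (if s1 > m then i1 + 1 else i1) (if s2 > m then i2 + 1 else i2) (if s3 > m then i3 + 1 else i3)
          (if s1 > m then s1 - h1.getD i1 0 else s1)
          (if s2 > m then s2 - h2.getD i2 0 else s2)
          (if s3 > m then s3 - h3.getD i3 0 else s3)
    else -1

def eqiheight_alt (h1 : List Int) (h2 : List Int) (h3 : List Int) : Int :=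
  eqiheightAltGo (h1.length + h2.length + h3.length + 1) h1 h2 h3 0 0 0 h1.sum h2.sum h3.sum

-- ===== PRECONDITION & SPEC =====
def Spec_eqiheight (h1 : List Int) (h2 : List Int) (h3 : List Int) (out : Int) : Prop := out = eqiheight_alt h1 h2 h3
instance (h1 : List Int) (h2 : List Int) (h3 : List Int) (out : Int) : Decidable (Spec_eqiheight h1 h2 h3 out) := by unfold Spec_eqiheight; infer_instance

-- ===== CLAIM (what is proved, stated in full; the proofs are below) =====
def Claim_equal_eqiheight : Prop := ∀ (h1 : List Int) (h2 : List Int) (h3 : List Int), Dom_eqiheight h1 h2 h3 → Spec_eqiheight h1 h2 h3 (eqiheight h1 h2 h3)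

-- ===== LEMMAS AND PROOFS =====

-- one-element step of a suffix sum: for i < length, sum (drop i) = l[i] + sum (drop (i+1))
theorem drop_sum_step (l : List Int) (i : Nat) (h : i < l.length) :
    (l.drop i).sum = l.getD i 0 + (l.drop (i + 1)).sum := by
  rw [List.drop_eq_getElem_cons h, List.sum_cons, List.getD_eq_getElem l 0 h]

-- drop i is nonempty exactly when i is in range
theorem drop_ne_nil_iff (l : List Int) (i : Nat) : l.drop i ≠ [] ↔ i < l.length := by
  rw [ne_eq, List.drop_eq_nil_iff]; omega

-- loop invariant: B's state (pointers + running sums of the suffixes) simulates A's state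
-- (the suffix lists themselves), fuel running in lockstep
theorem go_eq (h1 h2 h3 : List Int) : ∀ (fuel i1 i2 i3 : Nat),
    eqiheightAltGo fuel h1 h2 h3 i1 i2 i3 (h1.drop i1).sum (h2.drop i2).sum (h3.drop i3).sum
      = eqiheightGo fuel (h1.drop i1) (h2.drop i2) (h3.drop i3) := by
  intro fuel
  induction fuel with
  | zero => intro i1 i2 i3; rfl
  | succ fuel ih =>
    intro i1 i2 i3
    rw [eqiheightAltGo, eqiheightGo]
    by_cases hc : i1 < h1.length ∧ i2 < h2.length ∧ i3 < h3.length
    · obtain ⟨l1, l2, l3⟩ := hc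
      have hA : h1.drop i1 ≠ [] ∧ h2.drop i2 ≠ [] ∧ h3.drop i3 ≠ [] :=
        ⟨(drop_ne_nil_iff h1 i1).mpr l1, (drop_ne_nil_iff h2 i2).mpr l2,
         (drop_ne_nil_iff h3 i3).mpr l3⟩
      rw [if_pos ⟨l1, l2, l3⟩, if_pos hA]
      simp only []
      set s1 := (h1.drop i1).sum with hs1
      set s2 := (h2.drop i2).sum with hs2
      set s3 := (h3.drop i3).sum with hs3
      set m := min s1 (min s2 s3) with hm
      by_cases heq : s1 = s2 ∧ s2 = s3
      · rw [if_pos heq, if_pos heq]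
      · rw [if_neg heq, if_neg heq]
        have t1 : (if s1 > m then s1 - h1.getD i1 0 else s1)
            = (h1.drop (if s1 > m then i1 + 1 else i1)).sum := by
          split_ifs with h
          · rw [hs1, drop_sum_step h1 i1 l1]; ring
          · exact hs1
        have t2 : (if s2 > m then s2 - h2.getD i2 0 else s2)
            = (h2.drop (if s2 > m then i2 + 1 else i2)).sum := by
          split_ifs with h
          · rw [hs2, drop_sum_step h2 i2 l2]; ring
          · exact hs2
        have t3 : (if s3 > m then s3 - h3.getD i3 0 else s3)
            = (h3.drop (if s3 > m then i3 + 1 else i3)).sum := by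
          split_ifs with h
          · rw [hs3, drop_sum_step h3 i3 l3]; ring
          · exact hs3
        have r1 : (if s1 > m then (h1.drop i1).tail else h1.drop i1)
            = h1.drop (if s1 > m then i1 + 1 else i1) := by
          split_ifs with h
          · exact List.tail_drop ..
          · rfl
        have r2 : (if s2 > m then (h2.drop i2).tail else h2.drop i2)
            = h2.drop (if s2 > m then i2 + 1 else i2) := by
          split_ifs with h
          · exact List.tail_drop ..
          · rfl
        have r3 : (if s3 > m then (h3.drop i3).tail else h3.drop i3)
            = h3.drop (if s3 > m then i3 + 1 else i3) := by
          split_ifs with h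
          · exact List.tail_drop ..
          · rfl
        rw [t1, t2, t3, r1, r2, r3]
        exact ih ..
    · rw [if_neg hc, if_neg (by
        rintro ⟨a, b, c⟩
        rw [drop_ne_nil_iff] at a b c
        exact hc ⟨a, b, c⟩)]

-- ===== VERDICT (by name: the statement is the Claim_ definition above) =====
theorem eqiheight_spec : Claim_equal_eqiheight := by
  intro h1 h2 h3 _
  unfold Spec_eqiheight eqiheight_alt eqiheight
  have := go_eq h1 h2 h3 (h1.length + h2.length + h3.length + 1) 0 0 0
  simpa using this.symm
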